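-- pv_equiv track=rewrite | github.com/DCSEORG/App-Mod-Booster-Smaller-1105 | run-sql-dbrole.py | parse_sql_batches
-- ===== SOURCE A (Python) =====
-- def parse_sql_batches(sql_text: str) -> list[str]:
--     """Split a SQL script on GO statement boundaries."""
--     batches = []
--     current: list[str] = []
--     for line in sql_text.splitlines():
--         stripped = line.strip()
--         if stripped.upper() == "GO":
--             batch = "\n".join(current).strip()
--             if batch:
--                 batches.append(batch)
--             current = []
--         else:
--             current.append(line)
--     remainder = "\n".join(current).strip()
--     if remainder:
--         batches.append(remainder)
--     return batches
-- ===== SOURCE B (Python) =====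
-- def parse_sql_batches(sql_text: str) -> list[str]:
--     """Split a SQL script on GO statement boundaries."""
--     lines = sql_text.splitlines()
--     # Stage 1: locate the GO delimiter lines by index.
--     cuts = [i for i, line in enumerate(lines) if line.strip().upper() == "GO"]
--     # Stage 2: slice the line list between consecutive boundaries.
--     bounds = [-1] + cuts + [len(lines)]
--     batches = []
--     for a, b in zip(bounds, bounds[1:]):
--         batch = "\n".join(lines[a + 1:b]).strip()
--         if batch:
--             batches.append(batch)
--     return batches
-- ===== Notes on version B (the rewrite author's own statement) =====
-- stated objective: alternative
-- what changed: Instead of A's single pass with a running line buffer flushed at each GO, B first computes the list of GO delimiter line indices with enumerate, then slices the line list between consecutive boundary indices and join/strip/filters each slice.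
import Mathlib
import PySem

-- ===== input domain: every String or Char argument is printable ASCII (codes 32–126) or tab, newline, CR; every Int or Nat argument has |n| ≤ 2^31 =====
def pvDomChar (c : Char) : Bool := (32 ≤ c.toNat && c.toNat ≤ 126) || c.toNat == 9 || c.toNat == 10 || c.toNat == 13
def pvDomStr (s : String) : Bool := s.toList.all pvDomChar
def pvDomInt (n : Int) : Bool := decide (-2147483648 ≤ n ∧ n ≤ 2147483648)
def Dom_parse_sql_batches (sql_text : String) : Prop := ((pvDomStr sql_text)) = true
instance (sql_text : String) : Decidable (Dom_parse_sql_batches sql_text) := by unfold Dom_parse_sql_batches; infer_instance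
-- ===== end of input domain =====

-- B replaces A's running-buffer loop with an index-based algorithm: locate the GO
-- delimiter indices first, then slice the line list between consecutive boundaries;
-- objective: alternative (same O(n) cost, different data maintained).


-- ===== PORT A =====
-- A's loop over the lines, carrying (batches, current) exactly as the Python does.
def pvLoopA : List String → List String → List String → List String
  | [], batches, current =>
      let remainder := PySem.Str.strip (PySem.Str.join "\n" current)
      if remainder ≠ "" then batches ++ [remainder] else batches
  | line :: rest, batches, current =>
      let stripped := PySem.Str.strip line
      if PySem.Str.upper stripped == "GO" then
        let batch := PySem.Str.strip (PySem.Str.join "\n" current)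
        pvLoopA rest (if batch ≠ "" then batches ++ [batch] else batches) []
      else
        pvLoopA rest batches (current ++ [line])

def parse_sql_batches (sql_text : String) : List String :=
  pvLoopA (PySem.Str.splitlines sql_text) [] []

-- ===== PORT B =====
-- the GO-delimiter test on a line
def pvIsGO (line : String) : Bool := PySem.Str.upper (PySem.Str.strip line) == "GO"

def parse_sql_batches_alt (sql_text : String) : List String :=
  let lines := PySem.Str.splitlines sql_text
  -- Stage 1: the comprehension over enumerate(lines) collecting GO indices
  let cuts : List Int := ((PySem.List.enumerate lines).filter (fun p => pvIsGO p.2)).map (·.1)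
  -- Stage 2: slice between consecutive boundaries
  let bounds : List Int := [-1] ++ cuts ++ [(lines.length : Int)]
  (bounds.zip bounds.tail).foldl
    (fun batches ab =>
      let batch := PySem.Str.strip (PySem.Str.join "\n" (PySem.List.slice lines (some (ab.1 + 1)) (some ab.2)))
      if batch ≠ "" then batches ++ [batch] else batches) []

-- ===== PRECONDITION & SPEC =====
def Spec_parse_sql_batches (sql_text : String) (out : List String) : Prop := out = parse_sql_batches_alt sql_text
instance (sql_text : String) (out : List String) : Decidable (Spec_parse_sql_batches sql_text out) := by unfold Spec_parse_sql_batches; infer_instance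

-- ===== CLAIM =====
def Claim_equal_parse_sql_batches : Prop := ∀ (sql_text : String), Dom_parse_sql_batches sql_text → Spec_parse_sql_batches sql_text (parse_sql_batches sql_text)

-- ===== LEMMAS AND PROOFS =====
-- intermediate notion shared by both directions: the list of line segments
def pvSegs : List String → List (List String)
  | [] => [[]]
  | line :: rest =>
      if pvIsGO line then [] :: pvSegs rest
      else (pvSegs rest).modifyHead (line :: ·)

-- join/strip each segment, keep the non-empty ones
def pvStuff (segs : List (List String)) : List String :=
  (segs.map (fun seg => PySem.Str.strip (PySem.Str.join "\n" seg))).filter (fun b => b ≠ "")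

-- prepend pending lines onto the first segment
def pvConsFirst (cur : List String) : List (List String) → List (List String)
  | [] => [cur]
  | s :: r => (cur ++ s) :: r

theorem pvSegs_ne_nil (ls : List String) : pvSegs ls ≠ [] := by
  induction ls with
  | nil => simp [pvSegs]
  | cons l t ih =>
      simp only [pvSegs]
      split
      · simp
      · cases h : pvSegs t with
        | nil => exact absurd h ih
        | cons s r => simp [List.modifyHead]

theorem pvStuff_cons (s : List String) (r : List (List String)) :
    pvStuff (s :: r) =
      (if PySem.Str.strip (PySem.Str.join "\n" s) ≠ "" then [PySem.Str.strip (PySem.Str.join "\n" s)] else []) ++ pvStuff r := by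
  simp only [pvStuff, List.map_cons, List.filter_cons]
  split <;> simp_all

theorem pvLoopA_eq (ls : List String) : ∀ (batches current : List String),
    pvLoopA ls batches current = batches ++ pvStuff (pvConsFirst current (pvSegs ls)) := by
  induction ls with
  | nil =>
      intro batches current
      simp only [pvLoopA, pvSegs, pvConsFirst, List.append_nil]
      rw [pvStuff_cons]
      split <;> simp [pvStuff]
  | cons line rest ih =>
      intro batches current
      simp only [pvLoopA, pvSegs]
      by_cases hgo : (PySem.Str.upper (PySem.Str.strip line) == "GO") = true
      · have hgo2 : pvIsGO line = true := hgo
        simp only [hgo, hgo2, if_pos, ih]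
        have hne := pvSegs_ne_nil rest
        cases h : pvSegs rest with
        | nil => exact absurd h hne
        | cons s r =>
            simp only [pvConsFirst, List.nil_append]
            rw [pvStuff_cons (current ++ []), List.append_nil]
            split <;> simp
      · have hgo2 : ¬ pvIsGO line = true := hgo
        rw [if_neg hgo, if_neg hgo2, ih]
        congr 1
        have hne := pvSegs_ne_nil rest
        cases h : pvSegs rest with
        | nil => exact absurd h hne
        | cons s r => simp [pvConsFirst, List.modifyHead]

-- B side: the cut indices, boundary list and resulting pairs
def pvCuts (ls : List String) : List Int :=
  ((PySem.List.enumerate ls).filter (fun p => pvIsGO p.2)).map (·.1)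

def pvSlicer (ls : List String) (ab : Int × Int) : List String :=
  PySem.List.slice ls (some (ab.1 + 1)) (some ab.2)

def pvPairs (t : List Int) : List (Int × Int) := ((-1 : Int) :: t).zip t

theorem pvEnumShift {α : Type} (ls : List α) :
    ∀ s : Int, PySem.List.enumerate ls (s + 1) = (PySem.List.enumerate ls s).map (fun p => (p.1 + 1, p.2)) := by
  induction ls with
  | nil => intro s; simp [PySem.List.enumerate_nil]
  | cons x xs ih =>
      intro s
      rw [PySem.List.enumerate_cons, PySem.List.enumerate_cons, List.map_cons, ← ih (s + 1)]

theorem pvCuts_cons (l : String) (ls : List String) :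
    pvCuts (l :: ls) =
      (if pvIsGO l then [(0 : Int)] else []) ++ (pvCuts ls).map (· + 1) := by
  simp only [pvCuts]
  rw [show PySem.List.enumerate (l :: ls) = (0, l) :: PySem.List.enumerate ls 1 from
    PySem.List.enumerate_cons l ls 0]
  rw [show (1 : Int) = 0 + 1 from rfl, pvEnumShift]
  rw [List.filter_cons, List.filter_map, List.map_map]
  split <;> simp [List.map_map, Function.comp_def]

-- every cut index is nonnegative
theorem pvCuts_nonneg (ls : List String) : ∀ c ∈ pvCuts ls, 0 ≤ c := by
  intro c hc
  simp only [pvCuts, List.mem_map, List.mem_filter] at hc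
  obtain ⟨p, ⟨hp, _⟩, rfl⟩ := hc
  rw [PySem.List.mem_enumerate_iff] at hp
  obtain ⟨k, _, rfl⟩ := hp
  simp

theorem pvTail_nonneg (ls : List String) :
    ∀ x ∈ pvCuts ls ++ [((ls.length : Int))], 0 ≤ x := by
  intro x hx
  rcases List.mem_append.mp hx with h | h
  · exact pvCuts_nonneg ls x h
  · simp at h; omega

-- Python slice arithmetic facts used below
theorem pvSliceZeroZero (ls : List String) :
    PySem.List.slice ls (some (0 : Int)) (some (0 : Int)) = [] := by
  rw [PySem.List.slice_toNat ls (le_refl (0 : Int)) (le_refl (0 : Int))]; simp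

theorem pvShiftSlice (l : String) (ls : List String) (a b : Int) (ha : 0 ≤ a) (hb : 0 ≤ b) :
    PySem.List.slice (l :: ls) (some (a + 1)) (some (b + 1)) = PySem.List.slice ls (some a) (some b) := by
  rw [PySem.List.slice_toNat (l :: ls) (show (0:Int) ≤ a + 1 by omega) (show (0:Int) ≤ b + 1 by omega),
    PySem.List.slice_toNat ls ha hb]
  have h1 : (a + 1).toNat = a.toNat + 1 := by omega
  have h2 : (b + 1).toNat = b.toNat + 1 := by omega
  rw [h1, h2]
  simp [List.drop_succ_cons]

theorem pvHeadSlice (l : String) (ls : List String) (h : Int) (hh : 0 ≤ h) :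
    PySem.List.slice (l :: ls) (some (0 : Int)) (some (h + 1)) = l :: PySem.List.slice ls (some (0 : Int)) (some h) := by
  rw [PySem.List.slice_toNat (l :: ls) (le_refl (0 : Int)) (show (0:Int) ≤ h + 1 by omega),
    PySem.List.slice_toNat ls (le_refl (0 : Int)) hh]
  have h1 : (h + 1).toNat = h.toNat + 1 := by omega
  simp [h1]

theorem pvSegsB_eq (ls : List String) :
    (pvPairs (pvCuts ls ++ [((ls.length : Int))])).map (pvSlicer ls) = pvSegs ls := by
  induction ls with
  | nil =>
      simp only [pvCuts, PySem.List.enumerate_nil, List.filter_nil, List.map_nil, List.nil_append,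
        List.length_nil, Nat.cast_zero, pvPairs, pvSlicer, pvSegs, List.zip_cons_cons, List.zip_nil_right,
        List.map_cons]
      rw [show (-1 : Int) + 1 = 0 from rfl, pvSliceZeroZero]
  | cons l ls ih =>
      have hlen : ((((l :: ls).length : Nat)) : Int) = ((ls.length : Int)) + 1 := by
        simp
      cases hc : pvCuts ls ++ [((ls.length : Int))] with
      | nil => simp at hc
      | cons h r =>
          have hh : 0 ≤ h := pvTail_nonneg ls h (hc ▸ List.mem_cons_self ..)
          have hmem : ∀ ab ∈ (h :: r).zip r, 0 ≤ ab.1 ∧ 0 ≤ ab.2 := by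
            intro ab hab
            obtain ⟨h1, h2⟩ := List.of_mem_zip hab
            exact ⟨pvTail_nonneg ls ab.1 (hc ▸ h1), pvTail_nonneg ls ab.2 (hc ▸ List.mem_cons_of_mem h h2)⟩
          have hshiftmap :
              ∀ ab ∈ (h :: r).zip r,
                pvSlicer (l :: ls) (Prod.map (· + 1) (· + 1) ab) = pvSlicer ls ab := by
            intro ab hab
            obtain ⟨h1, h2⟩ := hmem ab hab
            simp only [pvSlicer, Prod.map]
            rw [show ab.1 + 1 + 1 = (ab.1 + 1) + 1 from rfl]
            exact pvShiftSlice l ls (ab.1 + 1) ab.2 (by omega) h2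
          have htail : pvCuts (l :: ls) ++ [(((l :: ls).length : Nat) : Int)]
              = (if pvIsGO l then [(0 : Int)] else []) ++ ((h + 1) :: r.map (· + 1)) := by
            have hm := congrArg (List.map (fun x : Int => x + 1)) hc
            simp only [List.map_append, List.map_cons, List.map_nil] at hm
            rw [pvCuts_cons, hlen, List.append_assoc, hm]
          rw [htail]
          simp only [pvSegs]
          by_cases hgo : pvIsGO l
          · rw [if_pos hgo, if_pos hgo]
            have hzip : pvPairs ((0 : Int) :: (h + 1) :: r.map (· + 1))
                = (-1, 0) :: ((0 : Int), h + 1) :: ((h :: r).zip r).map (Prod.map (· + 1) (· + 1)) := by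
              simp only [pvPairs, List.zip_cons_cons]
              rw [show ((h + 1) : Int) :: r.map (· + 1) = (h :: r).map (· + 1) from rfl, List.zip_map]
            simp only [List.singleton_append, hzip, List.map_cons]
            rw [List.map_map]
            simp only [Function.comp_def]
            rw [List.map_congr_left hshiftmap]
            have e1 : pvSlicer (l :: ls) (-1, 0) = [] := by
              simp only [pvSlicer]
              rw [show (-1 : Int) + 1 = 0 from rfl]
              exact pvSliceZeroZero _
            have e2 : pvSlicer (l :: ls) (0, h + 1) = pvSlicer ls (-1, h) := by
              simp only [pvSlicer]
              rw [show (0 : Int) + 1 = 0 + 1 from rfl, pvShiftSlice l ls 0 h le_rfl hh]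
              rw [show (-1 : Int) + 1 = 0 from rfl]
            rw [e1, e2, ← ih, hc]
            simp [pvPairs, List.zip_cons_cons]
          · rw [if_neg hgo, if_neg hgo]
            have hzip : pvPairs ((h + 1) :: r.map (· + 1))
                = ((-1 : Int), h + 1) :: ((h :: r).zip r).map (Prod.map (· + 1) (· + 1)) := by
              simp only [pvPairs, List.zip_cons_cons]
              rw [show ((h + 1) : Int) :: r.map (· + 1) = (h :: r).map (· + 1) from rfl, List.zip_map]
            simp only [List.nil_append, hzip, List.map_cons]
            rw [List.map_map]
            simp only [Function.comp_def]
            rw [List.map_congr_left hshiftmap]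
            have e1 : pvSlicer (l :: ls) (-1, h + 1) = l :: pvSlicer ls (-1, h) := by
              simp only [pvSlicer]
              rw [show (-1 : Int) + 1 = 0 from rfl, pvHeadSlice l ls h hh]
            rw [e1, ← ih, hc]
            simp [pvPairs, List.zip_cons_cons, List.modifyHead]

theorem foldB (lines : List String) (ps : List (Int × Int)) : ∀ acc : List String,
    ps.foldl (fun batches ab =>
      let batch := PySem.Str.strip (PySem.Str.join "\n" (PySem.List.slice lines (some (ab.1 + 1)) (some ab.2)))
      if batch ≠ "" then batches ++ [batch] else batches) acc
    = acc ++ pvStuff (ps.map (pvSlicer lines)) := by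
  induction ps with
  | nil => intro acc; simp [pvStuff]
  | cons p t ih =>
      intro acc
      rw [List.foldl_cons, ih, List.map_cons, pvStuff_cons]
      simp only [pvSlicer]
      split <;> simp_all

theorem altEq (s : String) :
    parse_sql_batches_alt s = pvStuff (pvSegs (PySem.Str.splitlines s)) := by
  have h1 : parse_sql_batches_alt s =
      ((pvPairs (pvCuts (PySem.Str.splitlines s) ++ [(((PySem.Str.splitlines s).length : Nat) : Int)])).foldl
        (fun batches ab =>
          let batch := PySem.Str.strip (PySem.Str.join "\n" (PySem.List.slice (PySem.Str.splitlines s) (some (ab.1 + 1)) (some ab.2)))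
          if batch ≠ "" then batches ++ [batch] else batches) []) := rfl
  rw [h1, foldB, List.nil_append, pvSegsB_eq]

-- ===== VERDICT =====
theorem parse_sql_batches_spec : Claim_equal_parse_sql_batches := by
  intro sql_text _
  unfold Spec_parse_sql_batches parse_sql_batches
  rw [pvLoopA_eq, List.nil_append, altEq]
  cases h : pvSegs (PySem.Str.splitlines sql_text) with
  | nil => exact absurd h (pvSegs_ne_nil _)
  | cons s r => simp [pvConsFirst]
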